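-- pv_equiv track=rewrite | github.com/YuraYeghiazaryan/Anaconda_SpecOps_Training | Day4.py | frequency_element
-- ===== SOURCE A (Python) =====
-- def frequency_element(lst):
--     dict = {}
--     for i in lst:
--         if i not in dict:
--             dict[i] = 1
--         else:
--             dict[i] += 1
--
--     for j in dict:
--        if dict[j] == max(dict.values()):
--         el = j
--     first = lst.index(el)
--     last = len(lst) - 1 - lst[::-1].index(el)
--     return len(lst[first:last])
-- ===== SOURCE B (Python) =====
-- def frequency_element(lst):
--     # One pass: value -> [count, first_index, last_index]; then pick the last
--     # max-count value in first-occurrence order and return last - first.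
--     info = {}
--     for idx, v in enumerate(lst):
--         rec = info.get(v)
--         if rec is None:
--             info[v] = [1, idx, idx]
--         else:
--             rec[0] += 1
--             rec[2] = idx
--     best = 0
--     for cnt, first, last in info.values():
--         if cnt >= best:
--             best = cnt
--             span = last - first
--     return span
-- ===== Notes on version B (the rewrite author's own statement) =====
-- stated objective: faster
-- what changed: B makes one pass storing (count, first index, last index) per value in a dict and one last-wins max scan over those records, replacing A's per-key max(dict.values()) rescans and the extra index()/reversed-index()/slice passes.
import Mathlib
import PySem

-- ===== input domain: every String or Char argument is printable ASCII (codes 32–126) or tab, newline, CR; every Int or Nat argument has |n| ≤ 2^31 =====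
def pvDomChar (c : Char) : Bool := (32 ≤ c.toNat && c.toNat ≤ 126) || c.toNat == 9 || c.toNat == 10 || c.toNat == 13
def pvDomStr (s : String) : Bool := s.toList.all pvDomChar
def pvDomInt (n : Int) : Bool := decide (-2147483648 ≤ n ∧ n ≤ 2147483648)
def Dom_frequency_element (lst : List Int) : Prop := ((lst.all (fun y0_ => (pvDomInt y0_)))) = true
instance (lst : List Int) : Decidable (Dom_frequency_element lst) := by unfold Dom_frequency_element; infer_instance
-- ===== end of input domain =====

-- B replaces A's repeated max()/index()/[::-1] passes by one dict pass storing
-- (count, first index, last index) per value and a single last-wins max scan (objective: faster, constant factor).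

-- ===== PORT A =====
-- A's counting loop: for i in lst: if i not in dict: dict[i]=1 else: dict[i]+=1
def feA_dict (lst : List Int) : PySem.Dict Int Int :=
  lst.foldl
    (fun d i =>
      if d.contains i = false then d.insert i 1
      else d.insert i (d.getD i 0 + 1))   -- dict[i] += 1 (i is present in this branch)
    PySem.Dict.empty

-- A's selection loop: for j in dict: if dict[j] == max(dict.values()): el = j
-- 'el' starts unbound in Python: ported as an Option accumulator starting at none.
def feA_pick (d : PySem.Dict Int Int) : Option Int :=
  d.keys.foldl
    (fun el j => if d.get? j = PySem.List.max? d.values (fun y => y) then some j else el)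
    none

def frequency_element (lst : List Int) : Int :=
  let d := feA_dict lst
  match feA_pick d with
  | none => 0          -- Python: NameError on 'el' (only when lst = []; excluded by Pre_)
  | some el =>
    match PySem.List.index? lst el,
          PySem.List.index? (((PySem.List.slice? lst none none (-1)).getD []) : List Int) el with
    | some first, some ridx =>
        let last : Int := (lst.length : Int) - 1 - (ridx : Int)
        ((PySem.List.slice lst (some (first : Int)) (some last)).length : Int)
    | _, _ => 0        -- unreachable: el occurs in lst

-- ===== PORT B =====
-- one pass: value -> (count, first index, last index)
def feB_build (lst : List Int) : PySem.Dict Int (Int × Int × Int) :=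
  (PySem.List.enumerate lst).foldl
    (fun d p =>
      match d.get? p.2 with
      | none => d.insert p.2 (1, p.1, p.1)
      | some r => d.insert p.2 (r.1 + 1, r.2.1, p.1))
    PySem.Dict.empty

-- last-wins max scan over the records; 'span' starts unbound in Python: Option accumulator.
def feB_pick (d : PySem.Dict Int (Int × Int × Int)) : Int × Option Int :=
  d.values.foldl
    (fun acc r => if r.1 ≥ acc.1 then (r.1, some (r.2.2 - r.2.1)) else acc)
    ((0 : Int), (none : Option Int))

def frequency_element_alt (lst : List Int) : Int :=
  ((feB_pick (feB_build lst)).2).getD 0   -- Python: NameError on 'span' only when lst = []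

-- ===== PRECONDITION & SPEC =====
-- Pre_ excludes only the empty list, on which the Python A raises NameError ('el' unbound).
def Pre_frequency_element (lst : List Int) : Prop := lst ≠ []
instance (lst : List Int) : Decidable (Pre_frequency_element lst) := by
  unfold Pre_frequency_element; infer_instance
def pvWitness_frequency_element : List Int := [1, 2, 2, 1, 3]

def Spec_frequency_element (lst : List Int) (out : Int) : Prop := out = frequency_element_alt lst
instance (lst : List Int) (out : Int) : Decidable (Spec_frequency_element lst out) := by
  unfold Spec_frequency_element; infer_instance

-- ===== CLAIM (what is proved, stated in full; the proofs are below) =====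
def Claim_equal_frequency_element : Prop :=
  ∀ (lst : List Int), Dom_frequency_element lst → Pre_frequency_element lst →
    Spec_frequency_element lst (frequency_element lst)

-- ===== LEMMAS AND PROOFS =====

-- get? through the count projection of an association list
theorem fe_get?_proj (lb : List (Int × (Int × Int × Int))) (k : Int) :
    (PySem.Dict.mk (lb.map (fun p => (p.1, p.2.1)))).get? k
      = ((PySem.Dict.mk lb).get? k).map (fun r => r.1) := by
  induction lb with
  | nil => rfl
  | cons q t ih =>
      rw [List.map_cons, PySem.Dict.get?_mk_cons, PySem.Dict.get?_mk_cons]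
      by_cases h : q.1 == k
      · simp [h]
      · simp only [h]; exact ih

-- what the record stored for key k means about the list processed so far
def feRec (l : List Int) (k c f la : Int) : Prop :=
  1 ≤ c ∧
  (∃ fn : Nat, PySem.List.index? l k = some fn ∧ (fn : Int) = f ∧
   ∃ rn : Nat, PySem.List.index? l.reverse k = some rn ∧ rn < l.length ∧
     (l.length : Int) - 1 - (rn : Int) = la ∧ fn ≤ l.length - 1 - rn)

theorem fe_rec_keep (l : List Int) (x k c f la : Int) (hkx : k ≠ x) (hkl : k ∈ l)
    (h : feRec l k c f la) : feRec (l ++ [x]) k c f la := by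
  obtain ⟨hc, fn, hfn, hfc, rn, hrn, hrlt, hla, hle⟩ := h
  refine ⟨hc, fn, ?_, hfc, rn + 1, ?_, ?_, ?_, ?_⟩
  · rw [PySem.List.index?_append_of_mem _ hkl]; exact hfn
  · rw [List.reverse_append, List.reverse_singleton, List.singleton_append,
      PySem.List.index?_cons_of_ne _ (Ne.symm hkx), hrn]; rfl
  · simp; omega
  · simp only [List.length_append, List.length_singleton]; push_cast; omega
  · simp only [List.length_append, List.length_singleton]; omega

theorem fe_rec_new (l : List Int) (x : Int) (hx : x ∉ l) :
    feRec (l ++ [x]) x 1 (l.length : Int) (l.length : Int) := by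
  refine ⟨le_refl 1, l.length, ?_, rfl, 0, ?_, ?_, ?_, ?_⟩
  · exact PySem.List.index?_append_singleton_self (l := l) (c := x) hx
  · rw [List.reverse_append, List.reverse_singleton, List.singleton_append]
    exact PySem.List.index?_cons_self _ _
  · simp
  · simp only [List.length_append, List.length_singleton]; push_cast; omega
  · simp only [List.length_append, List.length_singleton]; omega

theorem fe_rec_upd (l : List Int) (x c f la : Int) (h : feRec l x c f la) :
    feRec (l ++ [x]) x (c + 1) f (l.length : Int) := by
  obtain ⟨hc, fn, hfn, hfc, rn, hrn, hrlt, hla, hle⟩ := h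
  have hxl : x ∈ l := by
    rw [← PySem.List.index?_isSome_iff, hfn]; rfl
  refine ⟨by omega, fn, ?_, hfc, 0, ?_, ?_, ?_, ?_⟩
  · rw [PySem.List.index?_append_of_mem _ hxl]; exact hfn
  · rw [List.reverse_append, List.reverse_singleton, List.singleton_append]
    exact PySem.List.index?_cons_self _ _
  · simp
  · simp only [List.length_append, List.length_singleton]; push_cast; omega
  · simp only [List.length_append, List.length_singleton]; omega

-- the joint invariant of the two building loops
theorem fe_build_inv (l : List Int) :
    (feA_dict l).items = (feB_build l).items.map (fun p => (p.1, p.2.1)) ∧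
    (∀ k, (feB_build l).contains k = true ↔ k ∈ l) ∧
    (feB_build l).keys.Nodup ∧
    (∀ k c f la, (feB_build l).get? k = some (c, f, la) → feRec l k c f la) := by
  induction l using List.reverseRecOn with
  | nil =>
      refine ⟨rfl, by simp [feB_build, PySem.List.enumerate], by simp [feB_build, PySem.List.enumerate], ?_⟩
      intro k c f la h
      simp [feB_build, PySem.List.enumerate] at h
  | append_singleton l x ih =>
      obtain ⟨ha, hc, hnd, hb⟩ := ih
      have hget : ∀ k, (feA_dict l).get? k = ((feB_build l).get? k).map (fun r => r.1) := by
        intro k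
        have h := fe_get?_proj (feB_build l).items k
        rw [← ha] at h
        exact h
      have hcont : (feA_dict l).contains x = (feB_build l).contains x := by
        rw [PySem.Dict.contains_eq_isSome_get?, PySem.Dict.contains_eq_isSome_get?, hget]
        cases (feB_build l).get? x <;> rfl
      have hA : feA_dict (l ++ [x])
          = (if (feA_dict l).contains x = false then (feA_dict l).insert x 1
             else (feA_dict l).insert x ((feA_dict l).getD x 0 + 1)) := by
        rw [feA_dict, feA_dict, List.foldl_append]
        rfl
      have hB : feB_build (l ++ [x])
          = (match (feB_build l).get? x with
             | none => (feB_build l).insert x (1, (l.length : Int), (l.length : Int))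
             | some r => (feB_build l).insert x (r.1 + 1, r.2.1, (l.length : Int))) := by
        rw [feB_build, feB_build, PySem.List.enumerate_append, List.foldl_append]
        simp [PySem.List.enumerate]
      cases hx : (feB_build l).get? x with
      | none =>
          have hcf : (feB_build l).contains x = false := by
            rw [PySem.Dict.contains_eq_isSome_get?, hx]; rfl
          have hxl : x ∉ l := by
            intro hmem
            exact absurd ((hc x).mpr hmem) (by simp [hcf])
          rw [hB, hx]
          rw [hA, hcont, hcf, if_pos rfl]
          refine ⟨?_, ?_, ?_, ?_⟩
          · rw [PySem.Dict.items_insert_of_not_contains _ _ (hcont.trans hcf),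
              PySem.Dict.items_insert_of_not_contains _ _ hcf, ha, List.map_append]
            rfl
          · intro k
            rw [PySem.Dict.contains_insert]
            simp only [List.mem_append, List.mem_singleton, Bool.or_eq_true, beq_iff_eq]
            rw [hc]
            tauto
          · exact PySem.Dict.nodup_keys_insert _ _ _ hnd
          · intro k c f la h
            rw [PySem.Dict.get?_insert] at h
            by_cases hk : k = x
            · rw [if_pos hk] at h
              have h' : c = 1 ∧ f = (l.length : Int) ∧ la = (l.length : Int) := by
                simpa using h.symm
              obtain ⟨h1, h2, h3⟩ := h'
              subst h1 h2 h3
              rw [hk]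
              exact fe_rec_new l x hxl
            · rw [if_neg hk] at h
              have hkl : k ∈ l := by
                rw [← hc k, PySem.Dict.contains_eq_isSome_get?, h]; rfl
              exact fe_rec_keep l x k c f la hk hkl (hb k c f la h)
      | some r =>
          have hct : (feB_build l).contains x = true := by
            rw [PySem.Dict.contains_eq_isSome_get?, hx]; rfl
          have hgA : (feA_dict l).getD x 0 = r.1 := by
            rw [PySem.Dict.getD_eq_get?_getD, hget, hx]; rfl
          rw [hB, hx]
          rw [hA, hcont, hct]
          simp only [Bool.true_eq_false, if_false]
          rw [hgA]
          refine ⟨?_, ?_, ?_, ?_⟩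
          · rw [PySem.Dict.items_insert_of_contains _ _ (hcont.trans hct),
              PySem.Dict.items_insert_of_contains _ _ hct, ha, List.map_map, List.map_map]
            apply List.map_congr_left
            intro p _
            by_cases hpx : p.1 = x
            · simp [Function.comp, hpx]
            · simp [Function.comp, hpx]
          · intro k
            rw [PySem.Dict.contains_insert]
            simp only [List.mem_append, List.mem_singleton, Bool.or_eq_true, beq_iff_eq]
            rw [hc]
            tauto
          · exact PySem.Dict.nodup_keys_insert _ _ _ hnd
          · intro k c f la h
            rw [PySem.Dict.get?_insert] at h
            by_cases hk : k = x
            · rw [if_pos hk] at h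
              have h' : c = r.1 + 1 ∧ f = r.2.1 ∧ la = (l.length : Int) := by
                simpa using h.symm
              obtain ⟨h1, h2, h3⟩ := h'
              subst h1 h2 h3
              rw [hk]
              exact fe_rec_upd l x r.1 r.2.1 r.2.2 (hb x r.1 r.2.1 r.2.2 (by rw [hx]))
            · rw [if_neg hk] at h
              have hkl : k ∈ l := by
                rw [← hc k, PySem.Dict.contains_eq_isSome_get?, h]; rfl
              exact fe_rec_keep l x k c f la hk hkl (hb k c f la h)

-- max over a snoc list
theorem fe_max_snoc (l : List Int) (x m : Int)
    (h : PySem.List.max? l (fun y => y) = some m) :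
    PySem.List.max? (l ++ [x]) (fun y => y) = some (max m x) := by
  cases l with
  | nil => simp [PySem.List.max?] at h
  | cons a t =>
      rw [PySem.List.max?_id_cons, Option.some.injEq] at h
      rw [List.cons_append, PySem.List.max?_id_cons, List.foldl_append, h]
      rfl

-- the two selection folds pick the same (last, maximal-count) record
theorem fe_pick_lemma (ib : List (Int × (Int × Int × Int))) (hne : ib ≠ [])
    (hpos : ∀ p ∈ ib, (1 : Int) ≤ p.2.1) :
    ∃ p ∈ ib,
      PySem.List.max? (ib.map (fun p => p.2.1)) (fun y => y) = some p.2.1 ∧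
      ib.foldl (fun el q => if (some q.2.1 : Option Int) = some p.2.1 then some q.1 else el)
        (none : Option Int) = some p.1 ∧
      ib.foldl (fun acc r => if r.2.1 ≥ acc.1 then (r.2.1, some (r.2.2.2 - r.2.2.1)) else acc)
        ((0 : Int), (none : Option Int)) = (p.2.1, some (p.2.2.2 - p.2.2.1)) := by
  induction ib using List.reverseRecOn with
  | nil => exact absurd rfl hne
  | append_singleton t q ih =>
      rcases eq_or_ne t [] with rfl | ht
      · have h1 : (1 : Int) ≤ q.2.1 := hpos q (by simp)
        refine ⟨q, by simp, ?_, by simp, ?_⟩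
        · simp [PySem.List.max?_id_cons]
        · simp [show q.2.1 ≥ (0 : Int) by omega]
      · obtain ⟨p, hp, hmax, hfa, hfb⟩ := ih ht (fun r hr => hpos r (by simp [hr]))
        by_cases hge : q.2.1 ≥ p.2.1
        · refine ⟨q, by simp, ?_, ?_, ?_⟩
          · rw [List.map_append, List.map_singleton, fe_max_snoc _ _ _ hmax,
              max_eq_right hge]
          · simp
          · rw [List.foldl_append, hfb]
            simp [hge]
        · refine ⟨p, by simp [hp], ?_, ?_, ?_⟩
          · rw [List.map_append, List.map_singleton, fe_max_snoc _ _ _ hmax,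
              max_eq_left (by omega)]
          · rw [List.foldl_append, hfa]
            simp; omega
          · rw [List.foldl_append, hfb]
            simp; omega

-- assembling the two sides
theorem fe_main (lst : List Int) (hpre : lst ≠ []) :
    frequency_element lst = frequency_element_alt lst := by
  obtain ⟨ha, hc, hnd, hb⟩ := fe_build_inv lst
  have hget : ∀ k, (feA_dict lst).get? k = ((feB_build lst).get? k).map (fun r => r.1) := by
    intro k
    have h := fe_get?_proj (feB_build lst).items k
    rw [← ha] at h
    exact h
  have hibne : (feB_build lst).items ≠ [] := by
    cases lst with
    | nil => exact absurd rfl hpre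
    | cons y t =>
        have hmem : y ∈ (feB_build (y :: t)).keys :=
          (PySem.Dict.contains_iff_mem_keys _ _).mp ((hc y).mpr (by simp))
        intro hnil
        simp [PySem.Dict.keys, hnil] at hmem
  have hpos : ∀ p ∈ (feB_build lst).items, (1 : Int) ≤ p.2.1 := by
    intro p hp
    obtain ⟨k, c, f, la⟩ := p
    exact (hb k c f la (PySem.Dict.get?_of_mem_items _ hp hnd)).1
  obtain ⟨p, hpmem, hmax, hfa, hfb⟩ := fe_pick_lemma (feB_build lst).items hibne hpos
  obtain ⟨k, c, f, la⟩ := p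
  have hgB : (feB_build lst).get? k = some (c, f, la) :=
    PySem.Dict.get?_of_mem_items _ hpmem hnd
  obtain ⟨hc1, fn, hfn, hfc, rn, hrn, hrlt, hla, hle⟩ := hb k c f la hgB
  -- B's value
  have hvalB : (feB_build lst).values = (feB_build lst).items.map (fun q => q.2) := rfl
  have hBval : frequency_element_alt lst = la - f := by
    unfold frequency_element_alt feB_pick
    rw [hvalB, List.foldl_map]
    rw [show (List.foldl
        (fun acc q => if (q : Int × Int × Int × Int).2.1 ≥ acc.1
          then (q.2.1, some (q.2.2.2 - q.2.2.1)) else acc)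
        ((0 : Int), (none : Option Int)) (feB_build lst).items) = (c, some (la - f)) from hfb]
    rfl
  -- A's picked element
  have hvalA : (feA_dict lst).values = (feB_build lst).items.map (fun q => q.2.1) := by
    simp only [PySem.Dict.values, ha, List.map_map]
    rfl
  have hM : PySem.List.max? (feA_dict lst).values (fun y => y) = some c := by
    rw [hvalA]; exact hmax
  have hkeysA : (feA_dict lst).keys = (feB_build lst).items.map (fun q => q.1) := by
    simp only [PySem.Dict.keys, ha, List.map_map]
    rfl
  have hApick : feA_pick (feA_dict lst) = some k := by
    unfold feA_pick
    rw [hkeysA, List.foldl_map]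
    rw [PySem.List.foldl_congr_mem _ _
      (fun el (q : Int × Int × Int × Int) =>
        if (some q.2.1 : Option Int) = some c then some q.1 else el) _ ?_]
    · exact hfa
    · intro acc q hq
      have hq' : (q.1, q.2) ∈ (feB_build lst).items := by
        rw [Prod.mk.eta]; exact hq
      have hgq : (feA_dict lst).get? q.1 = some q.2.1 := by
        rw [hget, PySem.Dict.get?_of_mem_items _ hq' hnd]; rfl
      rw [hgq, hM]
  -- A's value
  have hlast : ((lst.length : Int) - 1 - (rn : Int)) = ((lst.length - 1 - rn : Nat) : Int) := by
    push_cast [Nat.sub_sub]; omega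
  have hA : frequency_element lst = ((lst.length - 1 - rn - fn : Nat) : Int) := by
    unfold frequency_element
    simp only [hApick, PySem.List.slice?_none_none_neg_one, Option.getD_some, hfn, hrn]
    rw [hlast, PySem.List.slice_natCast]
    simp only [List.length_take, List.length_drop]
    congr 1
    omega
  rw [hA, hBval, ← hla, ← hfc]
  omega

-- ===== VERDICT (by name: the statement is the Claim_ definition above) =====
theorem frequency_element_spec : Claim_equal_frequency_element := by
  intro lst _ hpre
  unfold Spec_frequency_element
  exact fe_main lst hpre
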